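-- pv_equiv track=rewrite | github.com/ninjaa/arc_hack_ryan_base | arckit-analysis/analysis.py | detect_square
-- ===== SOURCE A (Python) =====
-- def detect_square(grid, x, y, visited, current_color):
--     max_size = min(len(grid) - x, len(grid[0]) - y)
--     for size in range(1, max_size + 1):
--         if all(grid[i][j] == current_color and (i, j) not in visited
--                for i in range(x, x + size) for j in range(y, y + size)):
--             for i in range(x, x + size):
--                 for j in range(y, y + size):
--                     visited.add((i, j))
--             return "square", size
--     return None
-- ===== SOURCE B (Python) =====
-- def detect_square(grid, x, y, visited, current_color):
--     # A's loop can only ever succeed at size 1 (the size-1 check is the first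
--     # element of every larger check), so a single-cell check suffices.
--     if min(len(grid) - x, len(grid[0]) - y) >= 1 and grid[x][y] == current_color and (x, y) not in visited:
--         visited.add((x, y))
--         return "square", 1
--     return None
-- ===== Notes on version B (the rewrite author's own statement) =====
-- stated objective: simpler
-- what changed: Replaced the size loop with its nested all-scan over growing squares by the single-cell check it provably reduces to: the size-1 test is the first conjunct of every larger test, so A can only succeed at size 1.
import Mathlib
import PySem

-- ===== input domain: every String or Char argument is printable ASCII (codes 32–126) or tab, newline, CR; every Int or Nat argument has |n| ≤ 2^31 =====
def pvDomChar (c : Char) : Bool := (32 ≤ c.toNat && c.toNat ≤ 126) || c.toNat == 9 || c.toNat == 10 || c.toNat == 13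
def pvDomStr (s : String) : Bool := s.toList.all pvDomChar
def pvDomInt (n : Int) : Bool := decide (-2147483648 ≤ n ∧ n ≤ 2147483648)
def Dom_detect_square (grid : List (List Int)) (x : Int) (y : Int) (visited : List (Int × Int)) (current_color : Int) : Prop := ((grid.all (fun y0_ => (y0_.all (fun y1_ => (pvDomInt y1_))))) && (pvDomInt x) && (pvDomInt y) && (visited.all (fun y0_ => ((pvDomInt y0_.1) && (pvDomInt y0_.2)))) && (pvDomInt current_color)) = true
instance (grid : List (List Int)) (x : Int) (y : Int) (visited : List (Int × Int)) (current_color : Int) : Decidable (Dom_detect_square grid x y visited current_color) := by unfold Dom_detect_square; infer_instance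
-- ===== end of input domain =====

-- B replaces A's size loop (which can only ever succeed at size 1) by a direct single-cell
-- check; both mutate `visited` identically in Python, the claim is about the return value.

-- ===== PORT A =====
-- grid[i][j] (Python chained indexing; none = IndexError)
def dsCell (grid : List (List Int)) (i j : Int) : Option Int :=
  (PySem.List.pyGet? grid i).bind (fun row => PySem.List.pyGet? row j)

-- one conjunct of A's generator: grid[i][j] == current_color and (i, j) not in visited
def dsOk (grid : List (List Int)) (visited : List (Int × Int)) (current_color i j : Int) : Bool :=
  dsCell grid i j == some current_color && !(visited.contains (i, j))

-- the `all(... for i in range(x, x+size) for j in range(y, y+size))`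
def dsAll (grid : List (List Int)) (x y : Int) (visited : List (Int × Int)) (current_color size : Int) : Bool :=
  (PySem.List.pyRange x (x + size) 1).all (fun i =>
    (PySem.List.pyRange y (y + size) 1).all (fun j => dsOk grid visited current_color i j))

-- the `for size in range(1, max_size + 1)` loop (visited mutation has no effect on the result)
def dsLoop (grid : List (List Int)) (x y : Int) (visited : List (Int × Int)) (current_color : Int) : List Int → Option (String × Int)
  | [] => none
  | s :: rest =>
    if dsAll grid x y visited current_color s then some ("square", s)
    else dsLoop grid x y visited current_color rest

def detect_square (grid : List (List Int)) (x : Int) (y : Int) (visited : List (Int × Int)) (current_color : Int) : Option (String × Int) :=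
  let max_size : Int := min ((grid.length : Int) - x) (((grid.headD []).length : Int) - y)
  dsLoop grid x y visited current_color (PySem.List.pyRange 1 (max_size + 1) 1)

-- ===== PORT B =====
def detect_square_alt (grid : List (List Int)) (x : Int) (y : Int) (visited : List (Int × Int)) (current_color : Int) : Option (String × Int) :=
  if 1 ≤ min ((grid.length : Int) - x) (((grid.headD []).length : Int) - y)
      ∧ (PySem.List.pyGet? grid x).bind (fun row => PySem.List.pyGet? row y) = some current_color
      ∧ (x, y) ∉ visited
  then some ("square", 1)
  else none

-- ===== PRECONDITION & SPEC =====
-- Pre_ excludes exactly the inputs where A raises IndexError: the empty grid (len(grid[0])),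
-- and inputs where the loop runs at least once but grid[x][y] is out of range.
def Pre_detect_square (grid : List (List Int)) (x : Int) (y : Int) (visited : List (Int × Int)) (current_color : Int) : Prop :=
  grid ≠ [] ∧
  (1 ≤ min ((grid.length : Int) - x) (((grid.headD []).length : Int) - y) →
    ((PySem.List.pyGet? grid x).bind (fun row => PySem.List.pyGet? row y)).isSome)
instance (grid : List (List Int)) (x : Int) (y : Int) (visited : List (Int × Int)) (current_color : Int) : Decidable (Pre_detect_square grid x y visited current_color) := by unfold Pre_detect_square; infer_instance
def pvWitness_detect_square : List (List Int) × Int × Int × (List (Int × Int)) × Int := ([[1, 2], [3, 4]], 0, 1, [(0, 0)], 2)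

def Spec_detect_square (grid : List (List Int)) (x : Int) (y : Int) (visited : List (Int × Int)) (current_color : Int) (out : Option (String × Int)) : Prop := out = detect_square_alt grid x y visited current_color
instance (grid : List (List Int)) (x : Int) (y : Int) (visited : List (Int × Int)) (current_color : Int) (out : Option (String × Int)) : Decidable (Spec_detect_square grid x y visited current_color out) := by unfold Spec_detect_square; infer_instance

-- ===== CLAIM (what is proved, stated in full; the proofs are below) =====
def Claim_equal_detect_square : Prop := ∀ (grid : List (List Int)) (x : Int) (y : Int) (visited : List (Int × Int)) (current_color : Int), Dom_detect_square grid x y visited current_color → Pre_detect_square grid x y visited current_color → Spec_detect_square grid x y visited current_color (detect_square grid x y visited current_color)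

-- ===== LEMMAS AND PROOFS =====

-- If the single-cell condition at (x, y) fails, every square check fails (its generator
-- contains the pair (x, y)), so the whole loop returns none.
theorem dsAll_false (grid : List (List Int)) (x y : Int) (visited : List (Int × Int))
    (current_color s : Int) (hs : 1 ≤ s)
    (h : dsOk grid visited current_color x y = false) :
    dsAll grid x y visited current_color s = false := by
  apply Bool.eq_false_iff.mpr
  intro hall
  have hx : x ∈ PySem.List.pyRange x (x + s) 1 := by
    rw [PySem.List.mem_pyRange_one]; omega
  have hy : y ∈ PySem.List.pyRange y (y + s) 1 := by
    rw [PySem.List.mem_pyRange_one]; omega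
  have := (List.all_eq_true.mp ((List.all_eq_true.mp hall) x hx)) y hy
  rw [h] at this
  exact Bool.false_ne_true this

theorem dsLoop_none (grid : List (List Int)) (x y : Int) (visited : List (Int × Int))
    (current_color : Int) (sizes : List Int) (hall : ∀ s ∈ sizes, 1 ≤ s)
    (h : dsOk grid visited current_color x y = false) :
    dsLoop grid x y visited current_color sizes = none := by
  induction sizes with
  | nil => rfl
  | cons s rest ih =>
    simp only [dsLoop]
    rw [dsAll_false grid x y visited current_color s (hall s (List.mem_cons_self)) h]
    exact ih (fun t ht => hall t (List.mem_cons_of_mem s ht))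

-- At size 1 the check is exactly the single-cell condition.
theorem dsAll_one (grid : List (List Int)) (x y : Int) (visited : List (Int × Int))
    (current_color : Int) :
    dsAll grid x y visited current_color 1 = dsOk grid visited current_color x y := by
  simp [dsAll, PySem.List.pyRange_one_singleton]

-- ===== VERDICT (by name: the statement is the Claim_ definition above) =====
theorem detect_square_spec : Claim_equal_detect_square := by
  intro grid x y visited current_color _ _
  unfold Spec_detect_square detect_square detect_square_alt
  simp only []
  set m : Int := min ((grid.length : Int) - x) (((grid.headD []).length : Int) - y) with hm
  by_cases h1 : 1 ≤ m
  · rw [PySem.List.pyRange_one_cons (by omega)]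
    by_cases hc : dsOk grid visited current_color x y = true
    · simp only [dsLoop, dsAll_one, hc, if_true]
      have hcell : dsCell grid x y = some current_color ∧ (x, y) ∉ visited := by
        simpa [dsOk, List.contains_eq_mem] using hc
      rw [if_pos ⟨h1, hcell.1, hcell.2⟩]
    · have hc' : dsOk grid visited current_color x y = false := Bool.eq_false_iff.mpr hc
      rw [dsLoop_none _ _ _ _ _ _ (by
        intro s hs
        rw [List.mem_cons] at hs
        rcases hs with rfl | hs
        · omega
        · have := PySem.List.mem_pyRange_one.mp hs; omega) hc']
      have : ¬ ((PySem.List.pyGet? grid x).bind (fun row => PySem.List.pyGet? row y) = some current_color ∧ (x, y) ∉ visited) := by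
        intro ⟨ha, hb⟩
        apply hc
        simp [dsOk, dsCell, ha, List.contains_eq_mem, hb]
      rw [if_neg (by tauto)]
  · rw [PySem.List.pyRange_one_eq_nil (by omega)]
    rw [if_neg (by tauto)]
    rfl
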